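-- pv_equiv track=rewrite | github.com/29922-kamolina8/PYTHON_PROYECTO_PARCIAL3_WEB | templates/ejercicios/ejercicio4/pascal_triangle.py | formatear_triangulo_pascal
-- ===== SOURCE A (Python) =====
-- def formatear_triangulo_pascal(pascal):
--     """
--     Formatea el triángulo de Pascal para mostrarlo centrado en HTML.
--
--     Args:
--         pascal (list): Lista de listas con el triángulo de Pascal
--
--     Returns:
--         str: Código HTML con el triángulo formateado
--     """
--     if not pascal:
--         return ""
--
--     filas = len(pascal)
--     columnas = 2 * filas - 1
--     centro = filas - 1
--     ancho = 4  # Espacio fijo por número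
--
--     # Crear matriz vacía para centrar los números
--     grid = [['' for _ in range(columnas)] for _ in range(filas)]
--
--     # Colocar los números del triángulo
--     for f in range(filas):
--         for k in range(len(pascal[f])):
--             c = centro - f + 2 * k
--             grid[f][c] = str(pascal[f][k])
--
--     # Construir HTML
--     html = (
--         "<pre style='font-size:20px; line-height:1.3; "
--         "text-align:center; font-family:\"Courier New\", monospace;'>"
--     )
--
--     for f in range(filas):
--         for c in range(columnas):
--             if grid[f][c] == '':
--                 html += ' ' * ancho
--             else:
--                 html += grid[f][c].center(ancho)
--         html += "\n"
--
--     html += "</pre>"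
--
--     return html
-- ===== SOURCE B (Python) =====
-- def formatear_triangulo_pascal(pascal):
--     """Builds each centered line directly (padding + joined cells), no grid matrix."""
--     if not pascal:
--         return ""
--     filas = len(pascal)
--     columnas = 2 * filas - 1
--     centro = filas - 1
--     ancho = 4
--     hueco = ' ' * ancho
--     lineas = []
--     for f, fila in enumerate(pascal):
--         lead = centro - f
--         cuerpo = hueco.join(str(v).center(ancho) for v in fila)
--         ocupadas = 2 * len(fila) - 1 if fila else 0
--         lineas.append(hueco * lead + cuerpo + hueco * (columnas - lead - ocupadas) + "\n")
--     return (
--         "<pre style='font-size:20px; line-height:1.3; "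
--         "text-align:center; font-family:\"Courier New\", monospace;'>"
--         + "".join(lineas) + "</pre>"
--     )
-- ===== Notes on version B (the rewrite author's own statement) =====
-- stated objective: simpler
-- what changed: B drops A's fixed-width grid matrix entirely and builds each line directly as leading padding + the row's centered numbers joined by one blank cell + trailing padding.
import Mathlib
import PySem

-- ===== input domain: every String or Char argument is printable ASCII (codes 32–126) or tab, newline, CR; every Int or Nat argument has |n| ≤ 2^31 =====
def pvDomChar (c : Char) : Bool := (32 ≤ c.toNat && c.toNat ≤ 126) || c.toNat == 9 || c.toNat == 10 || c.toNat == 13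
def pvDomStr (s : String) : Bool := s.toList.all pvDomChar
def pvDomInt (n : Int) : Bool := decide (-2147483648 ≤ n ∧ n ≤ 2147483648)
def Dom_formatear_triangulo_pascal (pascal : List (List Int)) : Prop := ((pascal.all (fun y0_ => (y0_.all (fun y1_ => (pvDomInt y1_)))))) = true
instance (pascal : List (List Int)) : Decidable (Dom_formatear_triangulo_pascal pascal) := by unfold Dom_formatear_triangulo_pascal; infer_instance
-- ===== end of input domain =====

-- B replaces A's grid matrix by direct per-line construction (padding + joined centered cells); same output, simpler.


-- ===== PORT A =====
-- exact port of str.center(4) on a nonempty digit string: marg = 4 - len, left = marg // 2 (width 4 is even), pads with ' '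
def pyCenter4 (cs : List Char) : List Char :=
  if 4 ≤ cs.length then cs
  else (4 - cs.length) / 2 |> (fun l => List.replicate l ' ' ++ cs ++ List.replicate (4 - cs.length - l) ' ')

-- the two adjacent Python string literals, concatenated (shared by both ports; same literal in Source A and Source B)
def pvHeader : List Char :=
  "<pre style='font-size:20px; line-height:1.3; text-align:center; font-family:\"Courier New\", monospace;'>".toList

-- Port of A. Strings are carried as List Char (String.mk at the end). The Python builds `grid` as a list of
-- rows and the loop body for f mutates only row f, so the grid is transcribed row by row: row f is the fold of
-- `grid[f][c] = str(pascal[f][k])` over k. The html loop then walks the grid exactly as the Python does.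
def formatear_triangulo_pascal (pascal : List (List Int)) : String :=
  if pascal = [] then "" else
  let filas := pascal.length
  let columnas := 2 * filas - 1
  let centro := filas - 1
  let grid : List (List (List Char)) :=
    (List.range filas).map (fun f =>
      let fila := pascal.getD f []
      (List.range fila.length).foldl
        (fun row k => row.set (centro - f + 2 * k) (PySem.Int.toChars (fila.getD k 0)))
        (List.replicate columnas ([] : List Char)))
  let html :=
    grid.foldl (fun h row =>
      ((List.range columnas).foldl
        (fun h c => h ++ (if row.getD c [] = [] then List.replicate 4 ' ' else pyCenter4 (row.getD c [])))
        h) ++ ['\n'])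
      pvHeader
  String.mk (html ++ "</pre>".toList)

-- ===== PORT B =====
-- Port of Source B: each line is leading padding, the centered numbers joined by one empty cell, trailing padding.
def formatear_triangulo_pascal_alt (pascal : List (List Int)) : String :=
  if pascal = [] then "" else
  let filas : Int := pascal.length
  let columnas : Int := 2 * filas - 1
  let centro : Int := filas - 1
  let hueco : List Char := List.replicate 4 ' '
  let lineas : List (List Char) :=
    (PySem.List.enumerate pascal).map (fun fv =>
      let lead : Int := centro - fv.1
      let cuerpo := PySem.Chars.join hueco (fv.2.map (fun v => pyCenter4 (PySem.Int.toChars v)))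
      let ocupadas : Int := if fv.2 = [] then 0 else 2 * (fv.2.length : Int) - 1
      PySem.List.pyRepeat hueco lead ++ cuerpo ++ PySem.List.pyRepeat hueco (columnas - lead - ocupadas) ++ ['\n'])
  String.mk (pvHeader ++ lineas.flatten ++ "</pre>".toList)

-- ===== PRECONDITION & SPEC =====
-- Pre_ excludes exactly the malformed inputs on which A raises IndexError: a row f longer than the fixed-width
-- grid can hold (2*len(pascal[f]) > filas + f + 1). On every input A returns on, Pre_ holds.
def Pre_formatear_triangulo_pascal (pascal : List (List Int)) : Prop :=
  ∀ f ∈ List.range pascal.length, 2 * (pascal.getD f []).length ≤ pascal.length + f + 1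
instance (pascal : List (List Int)) : Decidable (Pre_formatear_triangulo_pascal pascal) := by
  unfold Pre_formatear_triangulo_pascal; infer_instance

def pvWitness_formatear_triangulo_pascal : List (List Int) := [[1], [1, 1], [1, 2, 1]]

def Spec_formatear_triangulo_pascal (pascal : List (List Int)) (out : String) : Prop := out = formatear_triangulo_pascal_alt pascal
instance (pascal : List (List Int)) (out : String) : Decidable (Spec_formatear_triangulo_pascal pascal out) := by unfold Spec_formatear_triangulo_pascal; infer_instance

-- ===== CLAIM (what is proved, stated in full; the proofs are below) =====
def Claim_equal_formatear_triangulo_pascal : Prop := ∀ (pascal : List (List Int)), Dom_formatear_triangulo_pascal pascal → Pre_formatear_triangulo_pascal pascal → Spec_formatear_triangulo_pascal pascal (formatear_triangulo_pascal pascal)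

-- ===== LEMMAS AND PROOFS =====

-- rendering of one grid cell in A's html loop
def renderCell (s : List Char) : List Char :=
  if s = [] then List.replicate 4 ' ' else pyCenter4 s

-- the nonempty cells of a grid row: the numbers with one empty cell between consecutive ones
def cellsOf : List Int → List (List Char)
  | [] => []
  | [x] => [PySem.Int.toChars x]
  | x :: y :: t => PySem.Int.toChars x :: [] :: cellsOf (y :: t)

lemma toChars_ne_nil (n : Int) : PySem.Int.toChars n ≠ [] := by
  unfold PySem.Int.toChars
  split
  · simp
  · exact List.ne_nil_of_length_pos Nat.length_toDigits_pos

lemma set_replicate {α : Type} (a v : α) {p n : Nat} (h : p < n) :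
    (List.replicate n a).set p v = List.replicate p a ++ v :: List.replicate (n - p - 1) a := by
  apply List.ext_getElem
  · simp; omega
  · intro i h1 h2
    simp only [List.getElem_set, List.getElem_replicate]
    rcases lt_trichotomy i p with hc | hc | hc
    · rw [if_neg (by omega), List.getElem_append_left (by simpa using hc), List.getElem_replicate]
    · subst hc; rw [if_pos rfl, List.getElem_append_right (by simp)]; simp
    · rw [if_neg (by omega), List.getElem_append_right (by simp; omega)]
      have : i - p ≠ 0 := by omega
      rcases Nat.exists_eq_succ_of_ne_zero this with ⟨j, hj⟩
      simp [hj]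

lemma foldl_set_append {α : Type} (ks : List Nat) (f : Nat → Nat) (g : Nat → α) (a b : List α) :
    ks.foldl (fun row k => row.set (a.length + f k) (g k)) (a ++ b)
      = a ++ ks.foldl (fun row k => row.set (f k) (g k)) b := by
  induction ks generalizing b with
  | nil => rfl
  | cons k ks ih =>
    simp only [List.foldl_cons]
    rw [List.set_append_right _ _ (by omega), Nat.add_sub_cancel_left, ih]

-- A's inner placement loop produces: p empty cells, the numbers separated by single empty cells, empty tail
lemma place_spec : ∀ (fila : List Int), fila ≠ [] → ∀ (p n : Nat), p + 2 * fila.length ≤ n + 1 →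
    (List.range fila.length).foldl
      (fun row k => row.set (p + 2 * k) (PySem.Int.toChars (fila.getD k 0)))
      (List.replicate n ([] : List Char))
    = List.replicate p [] ++ cellsOf fila ++ List.replicate (n - p - (2 * fila.length - 1)) [] := by
  intro fila
  induction fila using cellsOf.induct with
  | case1 => intro h; exact absurd rfl h
  | case2 x =>
    intro _ p n hb
    simp only [List.length_cons, List.length_nil] at hb ⊢
    have h1 : List.range (0 + 1) = [0] := rfl
    rw [h1]
    simp only [List.foldl_cons, List.foldl_nil, Nat.mul_zero, Nat.add_zero, List.getD_cons_zero]
    rw [set_replicate _ _ (by omega)]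
    have h2 : n - p - 1 = n - p - (2 * (0 + 1) - 1) := by omega
    rw [h2]
    simp [cellsOf]
  | case3 x y t ih =>
    intro _ p n hb
    simp only [List.length_cons] at hb ⊢
    rw [List.range_succ_eq_map]
    simp only [List.foldl_cons, List.foldl_map, Nat.mul_zero, Nat.add_zero, List.getD_cons_zero]
    rw [set_replicate _ _ (by omega)]
    have hrow : List.replicate p ([] : List Char) ++ PySem.Int.toChars x :: List.replicate (n - p - 1) []
        = (List.replicate p ([] : List Char) ++ [PySem.Int.toChars x]) ++ List.replicate (n - p - 1) [] := by
      simp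
    rw [hrow]
    have hfun : (fun (row : List (List Char)) (k : Nat) =>
          row.set (p + 2 * Nat.succ k) (PySem.Int.toChars ((x :: y :: t).getD (Nat.succ k) 0)))
        = (fun (row : List (List Char)) (k : Nat) =>
          row.set ((List.replicate p ([] : List Char) ++ [PySem.Int.toChars x]).length + (1 + 2 * k))
            (PySem.Int.toChars ((y :: t).getD k 0))) := by
      funext row k
      simp only [Nat.succ_eq_add_one, List.getD_cons_succ]
      congr 1
      simp
      omega
    rw [hfun, foldl_set_append]
    have ihh := ih (by simp) 1 (n - p - 1) (by simp only [List.length_cons]; omega)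
    simp only [List.length_cons] at ihh
    rw [ihh]
    have hc : n - p - 1 - 1 - (2 * (t.length + 1) - 1) = n - p - (2 * (t.length + 1 + 1) - 1) := by
      omega
    rw [hc]
    simp [cellsOf]

-- rendering the numbers-with-gaps block is exactly B's join
lemma cells_render (fila : List Int) (h : fila ≠ []) :
    ((cellsOf fila).map renderCell).flatten
      = PySem.Chars.join (List.replicate 4 ' ') (fila.map (fun v => pyCenter4 (PySem.Int.toChars v))) := by
  induction fila using cellsOf.induct with
  | case1 => exact absurd rfl h
  | case2 x =>
    simp [cellsOf, renderCell, toChars_ne_nil, PySem.Chars.join_singleton]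
  | case3 x y t ih =>
    simp only [cellsOf, List.map_cons, List.flatten_cons, renderCell, toChars_ne_nil x]
    rw [ih (by simp)]
    rw [PySem.Chars.join_cons_cons]
    simp [List.append_assoc]

lemma flatten_map_renderCell_replicate (p : Nat) :
    ((List.replicate p ([] : List Char)).map renderCell).flatten
      = (List.replicate p (List.replicate 4 ' ')).flatten := by
  simp [List.map_replicate, renderCell]

-- A's per-row html loop, over a row of the right length, as a flatten of rendered cells
lemma row_render (row : List (List Char)) (n : Nat) (hlen : row.length = n) (h : List Char) :
    (List.range n).foldl (fun h c => h ++ (if row.getD c [] = [] then List.replicate 4 ' ' else pyCenter4 (row.getD c []))) h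
      = h ++ (row.map renderCell).flatten := by
  rw [PySem.List.foldl_append_eq_flatMap]
  congr 1
  rw [List.flatMap_def]
  congr 1
  apply List.ext_getElem
  · simp [hlen]
  · intro i h1 h2
    simp only [List.getElem_map, List.getElem_range]
    rw [List.getD_eq_getElem _ _ (by simpa using h2)]
    simp [renderCell]

lemma length_foldl_set {α : Type} (ks : List Nat) (f : Nat → Nat) (g : Nat → α) (b : List α) :
    (ks.foldl (fun row k => row.set (f k) (g k)) b).length = b.length := by
  induction ks generalizing b with
  | nil => rfl
  | cons k ks ih => simp [List.foldl_cons, ih]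

-- one rendered grid row of A is exactly one line of B (without the trailing newline)
lemma rowchunk (filas f : Nat) (fila : List Int) (hf : f < filas)
    (hb : 2 * fila.length ≤ filas + f + 1) :
    (((List.range fila.length).foldl
        (fun row k => row.set (filas - 1 - f + 2 * k) (PySem.Int.toChars (fila.getD k 0)))
        (List.replicate (2 * filas - 1) ([] : List Char))).map renderCell).flatten
    = PySem.List.pyRepeat (List.replicate 4 ' ') ((filas : Int) - 1 - (f : Int))
      ++ PySem.Chars.join (List.replicate 4 ' ') (fila.map (fun v => pyCenter4 (PySem.Int.toChars v)))
      ++ PySem.List.pyRepeat (List.replicate 4 ' ')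
          ((2 * (filas : Int) - 1) - ((filas : Int) - 1 - (f : Int))
            - (if fila = [] then 0 else 2 * (fila.length : Int) - 1)) := by
  by_cases hne : fila = []
  · subst hne
    rw [if_pos (rfl : ([] : List Int) = [])]
    simp only [List.length_nil, List.range_zero, List.foldl_nil, List.map_nil,
      PySem.Chars.join_nil, List.append_nil]
    rw [flatten_map_renderCell_replicate]
    simp only [PySem.List.pyRepeat]
    rw [← List.flatten_append, ← List.replicate_add]
    congr 2
    omega
  · obtain ⟨z, zs, rfl⟩ := List.exists_cons_of_ne_nil hne
    rw [place_spec (z :: zs) hne (filas - 1 - f) (2 * filas - 1)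
      (by simp only [List.length_cons] at hb ⊢; omega)]
    simp only [List.map_append, List.flatten_append]
    rw [flatten_map_renderCell_replicate, flatten_map_renderCell_replicate,
      cells_render (z :: zs) hne]
    simp only [PySem.List.pyRepeat, if_neg hne, List.length_cons] at *
    have h1 : ((filas : Int) - 1 - (f : Int)).toNat = filas - 1 - f := by omega
    have h2 : ((2 * (filas : Int) - 1) - ((filas : Int) - 1 - (f : Int))
        - (2 * ((zs.length + 1 : Nat) : Int) - 1)).toNat
        = 2 * filas - 1 - (filas - 1 - f) - (2 * (zs.length + 1) - 1) := by
      omega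
    rw [h1, h2]

-- ===== VERDICT (by name: the statement is the Claim_ definition above) =====
theorem formatear_triangulo_pascal_spec : Claim_equal_formatear_triangulo_pascal := by
  intro pascal hdom hpre
  unfold Spec_formatear_triangulo_pascal formatear_triangulo_pascal formatear_triangulo_pascal_alt
  by_cases hnil : pascal = []
  · simp [hnil]
  · rw [if_neg hnil, if_neg hnil]
    dsimp only
    congr 1
    rw [List.foldl_map]
    have hfun : (fun (h : List Char) (f : Nat) =>
          ((List.range (2 * pascal.length - 1)).foldl
            (fun h c => h ++ (if ((List.range (pascal.getD f []).length).foldl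
                (fun row k => row.set (pascal.length - 1 - f + 2 * k)
                  (PySem.Int.toChars ((pascal.getD f []).getD k 0)))
                (List.replicate (2 * pascal.length - 1) ([] : List Char))).getD c [] = []
              then List.replicate 4 ' '
              else pyCenter4 (((List.range (pascal.getD f []).length).foldl
                (fun row k => row.set (pascal.length - 1 - f + 2 * k)
                  (PySem.Int.toChars ((pascal.getD f []).getD k 0)))
                (List.replicate (2 * pascal.length - 1) ([] : List Char))).getD c [])))
            h) ++ ['
'])
        = (fun (h : List Char) (f : Nat) => h ++
            ((((List.range (pascal.getD f []).length).foldl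
                (fun row k => row.set (pascal.length - 1 - f + 2 * k)
                  (PySem.Int.toChars ((pascal.getD f []).getD k 0)))
                (List.replicate (2 * pascal.length - 1) ([] : List Char))).map renderCell).flatten
              ++ ['
'])) := by
      funext h f
      rw [row_render _ (2 * pascal.length - 1)
        (by rw [length_foldl_set]; simp) h, List.append_assoc]
    rw [hfun, PySem.List.foldl_append_eq_flatMap, List.flatMap_def]
    simp only [List.append_assoc]
    congr 2
    apply congrArg
    apply List.ext_getElem
    · simp
    · intro i h1 h2
      simp only [List.getElem_map, List.getElem_range, PySem.List.getElem_enumerate]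
      have hi : i < pascal.length := by simpa using h1
      have hgetD : pascal.getD i [] = pascal[i] := List.getD_eq_getElem _ _ hi
      have hbnd := hpre i (List.mem_range.mpr hi)
      rw [hgetD] at *
      simp only [zero_add]
      rw [rowchunk pascal.length i pascal[i] hi (by omega)]
      simp
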